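-- pv_equiv track=rewrite | github.com/Pavan-Ponnaganti/Distributed_systems_projects-IIITH | linear_regime.py | get_local_max_degree
-- ===== SOURCE A (Python) =====
-- from collections import defaultdict
--
-- def get_local_max_degree(local_edges, local_nodes_map):
--     # We need to compute degrees for *all* nodes, not just local ones,
--     # as an edge (u, v) can have 'v' be non-local.
--     # A dictionary is the most space-efficient way.
--     degrees = defaultdict(int)
--     for u, v in local_edges:
--         degrees[u] += 1
--         degrees[v] += 1
--
--     # Find the max degree *only* among nodes this process owns
--     local_max = 0
--     for node in local_nodes_map:
--         local_max = max(local_max, degrees[node])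
--     return local_max
-- ===== SOURCE B (Python) =====
-- def get_local_max_degree(local_edges, local_nodes_map):
--     # No degree table at all: for each locally-owned node, count its degree
--     # directly from the edge list, and take the max (0 if there are no nodes).
--     return max(
--         (sum((u == node) + (v == node) for u, v in local_edges)
--          for node in local_nodes_map),
--         default=0,
--     )
-- ===== Notes on version B (the rewrite author's own statement) =====
-- stated objective: alternative
-- what changed: B drops the degree dictionary entirely: for each locally-owned node it counts that node's degree directly from the edge list and returns the max with default 0, trading A's O(E+N) hash-table pass for a table-free nested scan.
import Mathlib
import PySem

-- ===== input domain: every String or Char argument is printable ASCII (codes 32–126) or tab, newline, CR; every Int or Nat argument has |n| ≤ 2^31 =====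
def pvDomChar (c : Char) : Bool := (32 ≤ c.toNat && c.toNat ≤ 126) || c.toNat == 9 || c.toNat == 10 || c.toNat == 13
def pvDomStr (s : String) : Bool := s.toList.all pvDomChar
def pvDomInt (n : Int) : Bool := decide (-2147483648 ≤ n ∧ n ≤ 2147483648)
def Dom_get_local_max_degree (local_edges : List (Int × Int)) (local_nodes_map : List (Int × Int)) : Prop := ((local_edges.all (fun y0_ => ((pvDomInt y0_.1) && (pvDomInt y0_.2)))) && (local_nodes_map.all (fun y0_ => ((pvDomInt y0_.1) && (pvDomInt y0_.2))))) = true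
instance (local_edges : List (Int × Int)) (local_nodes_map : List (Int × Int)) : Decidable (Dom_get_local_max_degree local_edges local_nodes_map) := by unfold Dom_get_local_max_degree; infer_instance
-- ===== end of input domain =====

-- B removes A's degree dictionary: it counts each locally-owned node's degree
-- directly from the edge list and takes the max with default 0 (alternative
-- decomposition; a nested scan, not claimed faster).


-- ===== PORT A =====
-- Port of A: a degree table over ALL endpoints (defaultdict as modify with default 0),
-- then a running max over the locally-owned node keys.  The defaultdict read
-- degrees[node] yields 0 for an absent key; its side-effect insertion of a 0 cannot
-- change the returned value, so it is ported as getD _ 0 (exact for the return value).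
def get_local_max_degree (local_edges : List (Int × Int)) (local_nodes_map : List (Int × Int)) : Int :=
  let degrees : PySem.Dict Int Int :=
    local_edges.foldl (fun d uv => (d.modify uv.1 0 (· + 1)).modify uv.2 0 (· + 1)) PySem.Dict.empty
  local_nodes_map.foldl (fun local_max node => max local_max (degrees.getD node.1 0)) 0

-- ===== PORT B =====
-- Port of B: max(generator, default=0) is max? of the mapped list, getD 0;
-- sum((u == node) + (v == node) for u, v in edges) is a foldl of 0/1 indicators.
def get_local_max_degree_alt (local_edges : List (Int × Int)) (local_nodes_map : List (Int × Int)) : Int :=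
  (PySem.List.max?
    (local_nodes_map.map (fun node =>
      local_edges.foldl (fun acc uv =>
        acc + ((if uv.1 = node.1 then 1 else 0) + (if uv.2 = node.1 then 1 else 0))) (0 : Int)))
    (fun x => x)).getD 0

-- ===== PRECONDITION & SPEC =====
def Spec_get_local_max_degree (local_edges : List (Int × Int)) (local_nodes_map : List (Int × Int)) (out : Int) : Prop := out = get_local_max_degree_alt local_edges local_nodes_map
instance (local_edges : List (Int × Int)) (local_nodes_map : List (Int × Int)) (out : Int) : Decidable (Spec_get_local_max_degree local_edges local_nodes_map out) := by unfold Spec_get_local_max_degree; infer_instance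

-- ===== CLAIM =====
def Claim_equal_get_local_max_degree : Prop := ∀ (local_edges : List (Int × Int)) (local_nodes_map : List (Int × Int)), Dom_get_local_max_degree local_edges local_nodes_map → Spec_get_local_max_degree local_edges local_nodes_map (get_local_max_degree local_edges local_nodes_map)

-- ===== LEMMAS AND PROOFS =====

-- endpoints of the edge list, in order
def pvFlat (xs : List (Int × Int)) : List Int := xs.flatMap (fun uv => [uv.1, uv.2])

lemma foldA_eq_flat (xs : List (Int × Int)) (d : PySem.Dict Int Int) :
    xs.foldl (fun d uv => (d.modify uv.1 0 (· + 1)).modify uv.2 0 (· + 1)) d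
      = (pvFlat xs).foldl (fun d x => d.modify x 0 (· + 1)) d := by
  induction xs generalizing d with
  | nil => rfl
  | cons p t ih => simp [pvFlat, List.flatMap_cons, ih]

-- B's inner sum counts the node's occurrences among the edge endpoints
lemma foldB_count (xs : List (Int × Int)) (k : Int) (acc : Int) :
    xs.foldl (fun acc uv =>
        acc + ((if uv.1 = k then 1 else 0) + (if uv.2 = k then 1 else 0))) acc
      = acc + ((pvFlat xs).count k : Int) := by
  induction xs generalizing acc with
  | nil => simp [pvFlat]
  | cons p t ih =>
      simp only [List.foldl_cons, ih, pvFlat, List.flatMap_cons, List.count_cons, List.count_append]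
      by_cases h1 : p.1 = k <;> by_cases h2 : p.2 = k <;>
        simp [h1, h2] <;> omega

-- a running max seeded with 0 over nonnegative values equals max?-with-default-0
lemma foldl_max_eq_max?_getD (vs : List Int) (h : ∀ v ∈ vs, 0 ≤ v) :
    vs.foldl max 0 = (PySem.List.max? vs (fun x => x)).getD 0 := by
  cases vs with
  | nil => rfl
  | cons x t =>
      rw [PySem.List.max?_id_cons, Option.getD_some, List.foldl_cons,
        max_eq_right (h x (by simp))]

theorem get_local_max_degree_spec : Claim_equal_get_local_max_degree := by
  intro edges nodes _
  unfold Spec_get_local_max_degree get_local_max_degree get_local_max_degree_alt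
  rw [foldA_eq_flat]
  have hA : ∀ k : Int,
      ((pvFlat edges).foldl (fun d x => d.modify x 0 (· + 1)) PySem.Dict.empty).getD k 0
        = ((pvFlat edges).count k : Int) := by
    intro k; rw [PySem.Dict.getD_foldl_modify_add_one]; simp
  simp only [hA, foldB_count, zero_add]
  -- both sides are the max (default 0) of the same list of counts
  rw [← foldl_max_eq_max?_getD _ (by
    intro v hv
    obtain ⟨p, _, rfl⟩ := List.mem_map.mp hv
    positivity)]
  rw [List.foldl_map]

-- ===== VERDICT =====
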